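-- pv_equiv track=rewrite | github.com/eyereasoner/eye | logos/cases/aristotle_reductio_sqrt2.py | convergents_sqrt2
-- ===== SOURCE A (Python) =====
-- def convergents_sqrt2(k: int):
--     """
--     Generate first k+1 convergents to sqrt(2).
--     sqrt(2) = [1; 2, 2, 2, ...]
--     Recurrence:
--         p_{-2}=0, p_{-1}=1; q_{-2}=1, q_{-1}=0
--         p_k = a_k p_{k-1} + p_{k-2},  q_k = a_k q_{k-1} + q_{k-2}
--     where a_0=1 and a_k=2 for k>=1.
--     """
--     a0 = 1
--     p_prev2, p_prev1 = 0, 1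
--     q_prev2, q_prev1 = 1, 0
--
--     # k=0:
--     p0 = a0*p_prev1 + p_prev2   # 1*1 + 0 = 1
--     q0 = a0*q_prev1 + q_prev2   # 1*0 + 1 = 1
--     seq = [(p0, q0)]
--
--     p_prev2, p_prev1 = p_prev1, p0
--     q_prev2, q_prev1 = q_prev1, q0
--
--     for _ in range(1, k+1):
--         a = 2
--         p = a*p_prev1 + p_prev2
--         q = a*q_prev1 + q_prev2
--         seq.append((p, q))
--         p_prev2, p_prev1 = p_prev1, p
--         q_prev2, q_prev1 = q_prev1, q
--
--     return seq
-- ===== SOURCE B (Python) =====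
-- def convergents_sqrt2(k: int):
--     # Two phases: build the Pell-number list q_{-1}=0, q_0=1, q_n = 2*q_{n-1} + q_{n-2},
--     # then read off convergent i of sqrt(2) as (q_i + q_{i-1}, q_i) by pairing adjacent entries.
--     n = k if k > 0 else 0
--     pell = [0, 1]
--     for _ in range(n):
--         pell.append(2 * pell[-1] + pell[-2])
--     return [(pell[i] + pell[i + 1], pell[i + 1]) for i in range(n + 1)]
-- ===== Notes on version B (the rewrite author's own statement) =====
-- stated objective: alternative
-- what changed: Replaces A's single loop over a second-order p/q recurrence (four previous-value variables, special a0 step) by two phases: first build the list of Pell denominators q_n = 2*q_{n-1} + q_{n-2}, then produce each convergent as (q_i + q_{i-1}, q_i) by a comprehension pairing adjacent list entries.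
import Mathlib
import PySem

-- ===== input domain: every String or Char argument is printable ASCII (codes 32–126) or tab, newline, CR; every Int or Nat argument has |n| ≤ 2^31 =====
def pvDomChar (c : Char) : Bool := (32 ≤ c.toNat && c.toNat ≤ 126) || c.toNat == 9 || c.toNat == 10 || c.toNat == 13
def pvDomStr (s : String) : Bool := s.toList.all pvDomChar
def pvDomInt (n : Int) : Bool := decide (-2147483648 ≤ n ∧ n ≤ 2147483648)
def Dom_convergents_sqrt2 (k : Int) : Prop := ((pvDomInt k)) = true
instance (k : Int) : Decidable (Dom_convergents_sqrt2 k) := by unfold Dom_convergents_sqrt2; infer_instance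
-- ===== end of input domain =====

-- B replaces A's second-order p/q loop by two phases: build the Pell-denominator list
-- q_n = 2*q_{n-1} + q_{n-2}, then pair adjacent entries into convergents; same cost.

-- ===== PORT A =====
-- loop body of A: state = (seq, p_prev2, p_prev1, q_prev2, q_prev1)
def pvStepA (st : List (Int × Int) × Int × Int × Int × Int) (_ : Int) :
    List (Int × Int) × Int × Int × Int × Int :=
  let (seq, pp2, pp1, qp2, qp1) := st
  let a : Int := 2
  let p := a * pp1 + pp2
  let q := a * qp1 + qp2
  (seq ++ [(p, q)], pp1, p, qp1, q)

def convergents_sqrt2 (k : Int) : List (Int × Int) :=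
  let a0 : Int := 1
  let p_prev2 : Int := 0
  let p_prev1 : Int := 1
  let q_prev2 : Int := 1
  let q_prev1 : Int := 0
  let p0 := a0 * p_prev1 + p_prev2
  let q0 := a0 * q_prev1 + q_prev2
  let seq : List (Int × Int) := [(p0, q0)]
  let st := (PySem.List.pyRange 1 (k + 1) 1).foldl pvStepA (seq, p_prev1, p0, q_prev1, q0)
  st.1

-- ===== PORT B =====
-- loop body of B: pell.append(2*pell[-1] + pell[-2]); pell always has ≥ 2 elements,
-- so pyGetD with default 0 is exact (the Python indexing never raises).
def pvPellStep (pell : List Int) (_ : Int) : List Int :=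
  pell ++ [2 * PySem.List.pyGetD pell (-1) 0 + PySem.List.pyGetD pell (-2) 0]

def convergents_sqrt2_alt (k : Int) : List (Int × Int) :=
  let n : Int := if k > 0 then k else 0
  let pell : List Int := (PySem.List.pyRange 0 n 1).foldl pvPellStep [0, 1]
  (PySem.List.pyRange 0 (n + 1) 1).map (fun i =>
    (PySem.List.pyGetD pell i 0 + PySem.List.pyGetD pell (i + 1) 0,
     PySem.List.pyGetD pell (i + 1) 0))

-- ===== PRECONDITION & SPEC =====
def Spec_convergents_sqrt2 (k : Int) (out : List (Int × Int)) : Prop := out = convergents_sqrt2_alt k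
instance (k : Int) (out : List (Int × Int)) : Decidable (Spec_convergents_sqrt2 k out) := by unfold Spec_convergents_sqrt2; infer_instance

-- ===== CLAIM (what is proved, stated in full; the proofs are below) =====
def Claim_equal_convergents_sqrt2 : Prop := ∀ (k : Int), Dom_convergents_sqrt2 k → Spec_convergents_sqrt2 k (convergents_sqrt2 k)

-- ===== LEMMAS AND PROOFS =====

-- Pell numbers with pellF 0 = q_{-1} = 0, pellF 1 = q_0 = 1.
def pellF : Nat → Int
  | 0 => 0
  | 1 => 1
  | n + 2 => 2 * pellF (n + 1) + pellF n

-- the i-th convergent in terms of Pell numbers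
def convF (i : Nat) : Int × Int := (pellF i + pellF (i + 1), pellF (i + 1))

-- Both loops ignore the loop variable, so each foldl is an iterate of its step.
lemma foldl_ignore {α : Type} (g : α → Int → α) (h : ∀ a b b', g a b = g a b')
    (l : List Int) (s : α) : l.foldl g s = (fun a => g a 0)^[l.length] s := by
  induction l generalizing s with
  | nil => rfl
  | cons x l ih =>
    simp only [List.foldl, List.length_cons, Function.iterate_succ_apply]
    rw [h s x 0, ih]

-- one B step on a Pell prefix extends it
lemma pellStep_map (j : Nat) :
    pvPellStep ((List.range (j + 2)).map pellF) 0 = (List.range (j + 3)).map pellF := by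
  have hlen : ((List.range (j + 2)).map pellF).length = j + 2 := by simp
  unfold pvPellStep
  rw [PySem.List.pyGetD_neg_ofNat _ 1 0 (by omega) (by omega),
      PySem.List.pyGetD_neg_ofNat _ 2 0 (by omega) (by omega)]
  simp [List.range_succ, pellF]

-- iterating B's step from the seed builds the Pell list
lemma pell_iter (m : Nat) : ∀ (j : Nat),
    (fun a => pvPellStep a 0)^[m] ((List.range (j + 2)).map pellF)
      = (List.range (m + j + 2)).map pellF := by
  induction m with
  | zero => intro j; simp
  | succ m ih =>
    intro j
    rw [Function.iterate_succ_apply]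
    simp only [pellStep_map j]
    have : j + 3 = (j + 1) + 2 := by omega
    rw [this, ih (j + 1)]
    congr 2
    omega

-- A's loop invariant, phrased through Pell numbers
lemma aIter_fst (m : Nat) : ∀ (j : Nat) (seq : List (Int × Int)),
    ((fun st => pvStepA st 0)^[m]
        (seq, pellF (j + 1) - pellF j, pellF j + pellF (j + 1), pellF j, pellF (j + 1))).1
      = seq ++ (List.range m).map (fun i => convF (j + 1 + i)) := by
  induction m with
  | zero => intro j seq; simp
  | succ m ih =>
    intro j seq
    rw [Function.iterate_succ_apply]
    have hpell : pellF (j + 2) = 2 * pellF (j + 1) + pellF j := rfl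
    have hp : (2 : Int) * (pellF j + pellF (j + 1)) + (pellF (j + 1) - pellF j)
        = pellF (j + 1) + pellF (j + 2) := by rw [hpell]; ring
    have hq : (2 : Int) * pellF (j + 1) + pellF j = pellF (j + 2) := rfl
    have hr : pellF j + pellF (j + 1) = pellF (j + 2) - pellF (j + 1) := by rw [hpell]; ring
    have hstep : pvStepA (seq, pellF (j + 1) - pellF j, pellF j + pellF (j + 1),
          pellF j, pellF (j + 1)) 0
        = (seq ++ [convF (j + 1)], pellF (j + 2) - pellF (j + 1),
            pellF (j + 1) + pellF (j + 2), pellF (j + 1), pellF (j + 2)) := by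
      simp only [pvStepA]
      rw [hp, hq, hr]
      rfl
    rw [hstep]
    have h2 : j + 2 = (j + 1) + 1 := rfl
    rw [h2, ih (j + 1) (seq ++ [convF (j + 1)]), List.append_assoc]
    congr 1
    rw [List.range_succ_eq_map]
    simp only [List.map_cons, List.map_map, Function.comp_def, Nat.add_zero, List.cons_append,
      List.nil_append]
    congr 1
    exact List.map_congr_left fun i _ => congrArg convF (by omega)

-- A's output in closed form
lemma a_out (k : Int) :
    convergents_sqrt2 k = (List.range (k.toNat + 1)).map convF := by
  unfold convergents_sqrt2
  have hfold := foldl_ignore pvStepA (fun a b b' => rfl) (PySem.List.pyRange 1 (k + 1) 1)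
      ([((1:Int) * 1 + 0, (1:Int) * 0 + 1)], (1:Int), (1:Int) * 1 + 0, (0:Int), (1:Int) * 0 + 1)
  simp only [hfold, PySem.List.length_pyRange_one]
  have h1 : ([((1:Int) * 1 + 0, (1:Int) * 0 + 1)], (1:Int), (1:Int) * 1 + 0, (0:Int), (1:Int) * 0 + 1)
      = ([((1:Int), (1:Int))], pellF 1 - pellF 0, pellF 0 + pellF 1, pellF 0, pellF 1) := by
    simp [pellF]
  have h2 : (k + 1 - 1).toNat = k.toNat := by omega
  rw [h2]
  have := aIter_fst k.toNat 0 [((1:Int), (1:Int))]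
  simp only [Nat.zero_add] at this
  -- align the initial state, then the two list forms
  have h1' : ((fun st => pvStepA st 0)^[k.toNat]
      ([((1:Int) * 1 + 0, (1:Int) * 0 + 1)], (1:Int), (1:Int) * 1 + 0, (0:Int), (1:Int) * 0 + 1)).1
      = [((1:Int), (1:Int))] ++ (List.range k.toNat).map (fun i => convF (1 + i)) := by
    rw [h1]; exact this
  rw [h1', List.range_succ_eq_map]
  simp only [List.map_cons, List.map_map, Function.comp_def, List.singleton_append]
  have hhead : convF 0 = ((1 : Int), (1 : Int)) := by simp [convF, pellF]
  exact List.cons_eq_cons.mpr ⟨hhead.symm,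
    List.map_congr_left fun i _ => congrArg convF (Nat.add_comm 1 i)⟩

-- B's output in closed form
lemma b_out (k : Int) :
    convergents_sqrt2_alt k = (List.range (k.toNat + 1)).map convF := by
  unfold convergents_sqrt2_alt
  have hn0 : (0 : Int) ≤ (if k > 0 then k else 0) := by split <;> omega
  have hnt : (if k > 0 then k else 0).toNat = k.toNat := by split <;> omega
  have hfold := foldl_ignore pvPellStep (fun a b b' => rfl)
      (PySem.List.pyRange 0 (if k > 0 then k else 0) 1) [(0:Int), 1]
  have hseed : [(0:Int), 1] = (List.range 2).map pellF := by simp [List.range_succ, pellF]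
  simp only [hfold, PySem.List.length_pyRange_one]
  rw [hseed]
  have h02 : ((if k > 0 then k else 0) - 0).toNat = k.toNat := by split <;> omega
  rw [h02, show (2 : Nat) = 0 + 2 from rfl, pell_iter k.toNat 0]
  have hpr : PySem.List.pyRange 0 ((if k > 0 then k else 0) + 1) 1
      = (List.range (k.toNat + 1)).map (fun i : Nat => ((i : Int))) := by
    rw [PySem.List.pyRange_one]
    have : ((if k > 0 then k else 0) + 1 - 0).toNat = k.toNat + 1 := by split <;> omega
    rw [this]
    simp
  rw [hpr, List.map_map]
  apply List.map_congr_left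
  intro i hi
  have hi' : i < k.toNat + 1 := List.mem_range.mp hi
  have hget : ∀ (m : Nat), m < k.toNat + 2 →
      PySem.List.pyGetD ((List.range (k.toNat + 0 + 2)).map pellF) ((m : Int)) 0 = pellF m := by
    intro m hm
    rw [PySem.List.pyGetD_natCast]
    have hlt : m < ((List.range (k.toNat + 0 + 2)).map pellF).length := by
      simp; omega
    rw [List.getD_eq_getElem?_getD, List.getElem?_eq_getElem hlt]
    simp
  have e1 : ((i : Int)) + 1 = (((i + 1 : Nat)) : Int) := by push_cast; ring
  simp only [Function.comp_def, e1, hget i (by omega), hget (i + 1) (by omega)]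
  rfl

-- ===== VERDICT (by name: the statement is the Claim_ definition above) =====
theorem convergents_sqrt2_spec : Claim_equal_convergents_sqrt2 := by
  intro k _
  unfold Spec_convergents_sqrt2
  rw [a_out, b_out]
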